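-- pv_equiv track=rewrite | github.com/AzharMoosa/tutoringai | backend/common/question_engine/engines/true_false_engine.py | __remove_phrase
-- ===== SOURCE A (Python) =====
-- def __remove_phrase(sentence: str, phrase: str) -> str:
--     """
--     Locates the phrase in a sentence and removes it to
--     return a partial sentence with the phrase removed.
--
--     Arguments:
--         sentence {str} The full sentence that is being processed
--         phrase {str} The phrase to be removed from the sentence
--
--     Returns:
--         {str} The partial sentence with the phrase removed from
--               the original string.
--     """
--     phrase = phrase.replace(" ", "")
--     sentence_tokens = sentence.split()
--
--     # Locate Phrase
--     for i in range(len(sentence_tokens)):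
--         last_phrase = "".join(sentence_tokens[i:]).replace(" ", "")
--         if last_phrase == phrase:
--             # Remove Phrase From Sentence
--             return " ".join(sentence_tokens[:i])
--
--     return ""
-- ===== SOURCE B (Python) =====
-- def __remove_phrase(sentence: str, phrase: str) -> str:
--     target = phrase.replace(" ", "")
--     tokens = sentence.split()
--     # Scan from the RIGHT, accumulating the character length of the growing
--     # suffix.  Token lengths are positive, so suffix lengths are strictly
--     # increasing: the first (and only) index whose suffix length equals
--     # len(target) is the only candidate, and one string comparison decides.
--     need = len(target)
--     acc = 0
--     for i in range(len(tokens) - 1, -1, -1):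
--         acc += len(tokens[i])
--         if acc == need:
--             if "".join(tokens[i:]) == target:
--                 return " ".join(tokens[:i])
--             return ""
--     return ""
-- ===== Notes on version B (the rewrite author's own statement) =====
-- stated objective: faster
-- what changed: A joins and compares every suffix of the token list (quadratic); B scans the tokens right-to-left once accumulating the suffix character length, and since token lengths are positive the suffix lengths are strictly increasing, so the single index whose suffix length equals the target's length is the only candidate and one string comparison decides.
import Mathlib
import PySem

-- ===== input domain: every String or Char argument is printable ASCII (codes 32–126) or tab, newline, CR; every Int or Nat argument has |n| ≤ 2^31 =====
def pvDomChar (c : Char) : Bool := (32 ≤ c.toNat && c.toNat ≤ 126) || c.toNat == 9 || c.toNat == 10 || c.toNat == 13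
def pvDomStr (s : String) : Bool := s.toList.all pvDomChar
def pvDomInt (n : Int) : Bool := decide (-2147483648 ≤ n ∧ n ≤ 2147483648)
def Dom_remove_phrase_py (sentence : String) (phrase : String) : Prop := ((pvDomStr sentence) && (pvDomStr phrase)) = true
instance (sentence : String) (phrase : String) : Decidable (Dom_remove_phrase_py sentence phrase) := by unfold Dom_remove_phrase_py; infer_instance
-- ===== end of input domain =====

-- B replaces A's quadratic join-every-suffix scan by one right-to-left pass that
-- accumulates the suffix character length, so only one suffix is ever joined: faster.

-- ===== PORT A =====
-- 'for i in range(len(sentence_tokens)): …' as structural recursion on the index i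
def removePhraseLoopA (p : String) (toks : List String) (i : Nat) : String :=
  if i < toks.length then
    if PySem.Str.replace (PySem.Str.join "" (toks.drop i)) " " "" == p then
      PySem.Str.join " " (toks.take i)
    else removePhraseLoopA p toks (i + 1)
  else ""
termination_by toks.length - i
decreasing_by omega

def remove_phrase_py (sentence : String) (phrase : String) : String :=
  let p := PySem.Str.replace phrase " " ""
  let toks := PySem.Str.split₀ sentence
  removePhraseLoopA p toks 0

-- ===== PORT B =====
-- 'for i in range(len(tokens) - 1, -1, -1): acc += len(tokens[i]); …'
-- as structural recursion counting the index DOWN, carrying the running length acc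
def removePhraseLoopB (target : String) (toks : List String) : Nat → Int → String
  | 0, _ => ""
  | i + 1, acc =>
    let acc' := acc + PySem.Str.len (toks.getD i "")
    if acc' == PySem.Str.len target then
      if PySem.Str.join "" (toks.drop i) == target then
        PySem.Str.join " " (toks.take i)
      else ""
    else removePhraseLoopB target toks i acc'

def remove_phrase_py_alt (sentence : String) (phrase : String) : String :=
  let target := PySem.Str.replace phrase " " ""
  let toks := PySem.Str.split₀ sentence
  removePhraseLoopB target toks toks.length 0

-- ===== PRECONDITION & SPEC =====
def Spec_remove_phrase_py (sentence : String) (phrase : String) (out : String) : Prop := out = remove_phrase_py_alt sentence phrase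
instance (sentence : String) (phrase : String) (out : String) : Decidable (Spec_remove_phrase_py sentence phrase out) := by unfold Spec_remove_phrase_py; infer_instance

-- ===== CLAIM (what is proved, stated in full; the proofs are below) =====
def Claim_equal_remove_phrase_py : Prop := ∀ (sentence : String) (phrase : String), Dom_remove_phrase_py sentence phrase → Spec_remove_phrase_py sentence phrase (remove_phrase_py sentence phrase)

-- ===== LEMMAS AND PROOFS =====

theorem flatten_intersperse_nil {α : Type} (l : List (List α)) :
    (List.intersperse ([] : List α) l).flatten = l.flatten := by
  induction l with
  | nil => rfl
  | cons a t ih =>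
    cases t with
    | nil => rfl
    | cons b u =>
      simp only [List.intersperse] at *
      simp [ih]

theorem join_empty_len (parts : List String) :
    PySem.Str.len (PySem.Str.join "" parts) = (parts.map (fun t => PySem.Str.len t)).sum := by
  simp [PySem.Str.len, PySem.Str.join, PySem.Chars.join, List.intercalate,
    flatten_intersperse_nil, Function.comp_def]

-- tokens produced by str.split() are nonempty and contain no whitespace characters
theorem split_go_tokens (s : List Char) : ∀ (cur : List Char) (acc : List (List Char)),
    (∀ c ∈ cur, PySem.Chars.isspace c = false) →
    (∀ t ∈ acc, t ≠ [] ∧ ∀ c ∈ t, PySem.Chars.isspace c = false) →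
    ∀ t ∈ PySem.Chars.split₀.go s cur acc, t ≠ [] ∧ ∀ c ∈ t, PySem.Chars.isspace c = false := by
  induction s with
  | nil =>
    intro cur acc hcur hacc t ht
    simp only [PySem.Chars.split₀.go] at ht
    split at ht
    · exact hacc t (List.mem_reverse.mp ht)
    · rw [List.mem_reverse, List.mem_cons] at ht
      rcases ht with h | h
      · subst h
        refine ⟨?_, ?_⟩
        · intro hnil
          exact ‹¬ _› (by simp [List.reverse_eq_nil_iff.mp hnil] : cur.isEmpty = true)
        · intro c hc; exact hcur c (List.mem_reverse.mp hc)
      · exact hacc t h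
  | cons c rest ih =>
    intro cur acc hcur hacc t ht
    simp only [PySem.Chars.split₀.go] at ht
    split at ht
    · split at ht
      · exact ih [] acc (by simp) hacc t ht
      · refine ih [] _ (by simp) ?_ t ht
        intro u hu
        rcases List.mem_cons.mp hu with hu | hu
        · subst hu
          refine ⟨?_, ?_⟩
          · intro hnil
            exact ‹¬ _› (by simp [List.reverse_eq_nil_iff.mp hnil] : cur.isEmpty = true)
          · intro d hd; exact hcur d (List.mem_reverse.mp hd)
        · exact hacc u hu
    · refine ih (c :: cur) acc ?_ hacc t ht
      intro d hd
      rcases List.mem_cons.mp hd with hd | hd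
      · subst hd
        exact (Bool.not_eq_true _) ▸ ‹¬ PySem.Chars.isspace d = true›
      · exact hcur d hd

theorem split₀_tokens (s : String) :
    ∀ t ∈ PySem.Str.split₀ s, t.toList ≠ [] ∧ ∀ c ∈ t.toList, PySem.Chars.isspace c = false := by
  intro t ht
  simp only [PySem.Str.split₀, List.mem_map] at ht
  obtain ⟨l, hl, rfl⟩ := ht
  rw [String.toList_ofList]
  exact split_go_tokens s.toList [] [] (by simp) (by simp) l hl

theorem replace_go_space_id : ∀ (fuel : Nat) (l acc : List Char), (∀ c ∈ l, c ≠ ' ') →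
    PySem.Chars.replace.go [' '] [] fuel l acc = acc.reverse ++ l := by
  intro fuel
  induction fuel with
  | zero => intro l acc _; simp [PySem.Chars.replace.go]
  | succ n ih =>
    intro l acc hl
    cases l with
    | nil => simp [PySem.Chars.replace.go]
    | cons c t =>
      have hc : c ≠ ' ' := hl c (by simp)
      have hpre : List.isPrefixOf [' '] (c :: t) = false := by
        simp [List.isPrefixOf]
        intro h; exact absurd h.symm hc
      simp only [PySem.Chars.replace.go, hpre]
      rw [ih t (c :: acc) (fun d hd => hl d (by simp [hd]))]
      simp

theorem replace_space_id (s : String) (h : ∀ c ∈ s.toList, c ≠ ' ') :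
    PySem.Str.replace s " " "" = s := by
  have h1 : (" " : String).toList = [' '] := rfl
  simp only [PySem.Str.replace, h1]
  rw [show ("" : String).toList = [] from rfl]
  rw [PySem.Chars.replace]
  simp only [List.isEmpty_iff, if_neg (by simp : ¬([' '] : List Char) = [])]
  rw [replace_go_space_id s.toList.length s.toList [] h]
  simp [String.ofList_toList]

theorem join_no_space (parts : List String)
    (h : ∀ t ∈ parts, ∀ c ∈ t.toList, PySem.Chars.isspace c = false) :
    ∀ c ∈ (PySem.Str.join "" parts).toList, c ≠ ' ' := by
  intro c hc
  have hflat : (PySem.Str.join "" parts).toList = (parts.map String.toList).flatten := by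
    simp [PySem.Str.join, PySem.Chars.join, List.intercalate, flatten_intersperse_nil,
      String.toList_ofList]
  rw [hflat] at hc
  rcases List.mem_flatten.mp hc with ⟨l, hl, hcl⟩
  rcases List.mem_map.mp hl with ⟨t, ht, rfl⟩
  intro hsp
  have := h t ht c hcl
  subst hsp
  exact absurd this (by decide)

theorem suffix_len_split (toks : List String) (i : Nat) (hi : i < toks.length) :
    PySem.Str.len (PySem.Str.join "" (toks.drop i)) =
      PySem.Str.len toks[i] + PySem.Str.len (PySem.Str.join "" (toks.drop (i + 1))) := by
  rw [join_empty_len, join_empty_len, List.drop_eq_getElem_cons hi, List.map_cons, List.sum_cons]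

-- suffix character lengths strictly decrease as the start index grows
theorem suffix_len_mono (toks : List String) (hp : ∀ t ∈ toks, 0 < PySem.Str.len t) :
    ∀ k j, j < k → k ≤ toks.length →
      PySem.Str.len (PySem.Str.join "" (toks.drop k)) <
        PySem.Str.len (PySem.Str.join "" (toks.drop j)) := by
  intro k
  induction k with
  | zero => intro j h; omega
  | succ k ih =>
    intro j hj hk
    have hstep : PySem.Str.len (PySem.Str.join "" (toks.drop (k + 1))) <
        PySem.Str.len (PySem.Str.join "" (toks.drop k)) := by
      rw [suffix_len_split toks k (by omega)]
      have := hp toks[k] (by exact List.getElem_mem (by omega))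
      omega
    rcases Nat.lt_or_ge j k with h | h
    · exact lt_trans hstep (ih j h (by omega))
    · have hjk : j = k := by omega
      subst hjk; exact hstep

-- A's loop, when no suffix from index i on equals p, returns ""
theorem loopA_none (p : String) (toks : List String)
    (htoks : ∀ t ∈ toks, t.toList ≠ [] ∧ ∀ c ∈ t.toList, PySem.Chars.isspace c = false) :
    ∀ i, (∀ j, i ≤ j → j < toks.length → PySem.Str.join "" (toks.drop j) ≠ p) →
      removePhraseLoopA p toks i = "" := by
  intro i
  induction hn : toks.length - i using Nat.strong_induction_on generalizing i with
  | _ n ih =>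
  intro hno
  rw [removePhraseLoopA]
  by_cases hi : i < toks.length
  · have hns : ∀ c ∈ (PySem.Str.join "" (toks.drop i)).toList, c ≠ ' ' :=
      join_no_space _ (fun t ht => (htoks t (List.mem_of_mem_drop ht)).2)
    rw [if_pos hi, replace_space_id _ hns,
      beq_eq_false_iff_ne.mpr (hno i le_rfl hi)]
    simp only [Bool.false_eq_true, if_false]
    exact ih (toks.length - (i + 1)) (by omega) (i + 1) rfl
      (fun j h1 h2 => hno j (by omega) h2)
  · rw [if_neg hi]

-- A's loop finds the (unique) matching suffix index jm ≥ i
theorem loopA_found (p : String) (toks : List String)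
    (htoks : ∀ t ∈ toks, t.toList ≠ [] ∧ ∀ c ∈ t.toList, PySem.Chars.isspace c = false)
    (hp : ∀ t ∈ toks, 0 < PySem.Str.len t) :
    ∀ i jm, i ≤ jm → jm < toks.length → PySem.Str.join "" (toks.drop jm) = p →
      removePhraseLoopA p toks i = PySem.Str.join " " (toks.take jm) := by
  intro i
  induction hn : toks.length - i using Nat.strong_induction_on generalizing i with
  | _ n ih =>
  intro jm hij hjm hm
  rw [removePhraseLoopA]
  have hi : i < toks.length := by omega
  have hns : ∀ c ∈ (PySem.Str.join "" (toks.drop i)).toList, c ≠ ' ' :=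
    join_no_space _ (fun t ht => (htoks t (List.mem_of_mem_drop ht)).2)
  rw [if_pos hi, replace_space_id _ hns]
  rcases Nat.eq_or_lt_of_le hij with h | h
  · subst h
    rw [beq_iff_eq.mpr hm, if_pos rfl]
  · have hne : PySem.Str.join "" (toks.drop i) ≠ p := by
      intro he
      have := suffix_len_mono toks hp jm i h (by omega)
      rw [hm, he] at this
      omega
    rw [beq_eq_false_iff_ne.mpr hne]
    simp only [Bool.false_eq_true, if_false]
    exact ih (toks.length - (i + 1)) (by omega) (i + 1) rfl jm (by omega) hjm hm

-- B's loop, when no suffix starting below i equals the target, returns ""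
theorem loopB_none (target : String) (toks : List String) :
    ∀ i, i ≤ toks.length →
      (∀ j, j < i → PySem.Str.join "" (toks.drop j) ≠ target) →
      removePhraseLoopB target toks i
        (PySem.Str.len (PySem.Str.join "" (toks.drop i))) = "" := by
  intro i
  induction i with
  | zero => intro _ _; rfl
  | succ i ih =>
    intro hi hno
    rw [removePhraseLoopB]
    have hlt : i < toks.length := by omega
    have hacc : PySem.Str.len (PySem.Str.join "" (toks.drop (i + 1))) +
        PySem.Str.len (toks.getD i "") =
        PySem.Str.len (PySem.Str.join "" (toks.drop i)) := by
      rw [List.getD_eq_getElem toks "" hlt, suffix_len_split toks i hlt]; omega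
    simp only [hacc]
    by_cases hl : PySem.Str.len (PySem.Str.join "" (toks.drop i)) = PySem.Str.len target
    · rw [beq_iff_eq.mpr hl, if_pos rfl,
        beq_eq_false_iff_ne.mpr (hno i (by omega))]
      simp
    · rw [beq_eq_false_iff_ne.mpr hl]
      simp only [Bool.false_eq_true, if_false]
      exact ih (by omega) (fun j hj => hno j (by omega))

-- B's loop finds the (unique) matching suffix index jm < i
theorem loopB_found (target : String) (toks : List String)
    (hp : ∀ t ∈ toks, 0 < PySem.Str.len t) :
    ∀ i jm, jm < i → i ≤ toks.length → PySem.Str.join "" (toks.drop jm) = target →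
      removePhraseLoopB target toks i
        (PySem.Str.len (PySem.Str.join "" (toks.drop i))) =
        PySem.Str.join " " (toks.take jm) := by
  intro i
  induction i with
  | zero => intro jm h; omega
  | succ i ih =>
    intro jm hjm hi hm
    rw [removePhraseLoopB]
    have hlt : i < toks.length := by omega
    have hacc : PySem.Str.len (PySem.Str.join "" (toks.drop (i + 1))) +
        PySem.Str.len (toks.getD i "") =
        PySem.Str.len (PySem.Str.join "" (toks.drop i)) := by
      rw [List.getD_eq_getElem toks "" hlt, suffix_len_split toks i hlt]; omega
    simp only [hacc]
    rcases Nat.eq_or_lt_of_le (Nat.le_of_lt_succ hjm) with h | h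
    · subst h
      rw [beq_iff_eq.mpr (by rw [hm]), if_pos rfl, beq_iff_eq.mpr hm, if_pos rfl]
    · have hl : PySem.Str.len (PySem.Str.join "" (toks.drop i)) ≠ PySem.Str.len target := by
        intro he
        have := suffix_len_mono toks hp i jm h (by omega)
        rw [he, ← hm] at this
        omega
      rw [beq_eq_false_iff_ne.mpr hl]
      simp only [Bool.false_eq_true, if_false]
      exact ih jm h (by omega) hm

theorem drop_length_len_zero (toks : List String) :
    PySem.Str.len (PySem.Str.join "" (toks.drop toks.length)) = 0 := by
  rw [List.drop_length, join_empty_len]; simp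

-- ===== VERDICT (by name: the statement is the Claim_ definition above) =====
theorem remove_phrase_py_spec : Claim_equal_remove_phrase_py := by
  intro sentence phrase _
  unfold Spec_remove_phrase_py
  simp only [remove_phrase_py, remove_phrase_py_alt]
  set p := PySem.Str.replace phrase " " "" with hpdef
  set toks := PySem.Str.split₀ sentence with htdef
  have htoks := split₀_tokens sentence
  rw [← htdef] at htoks
  have hpos : ∀ t ∈ toks, 0 < PySem.Str.len t := by
    intro t ht
    have hne := (htoks t ht).1
    simp only [PySem.Str.len]
    have : t.toList.length ≠ 0 := fun h => hne (List.eq_nil_of_length_eq_zero h)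
    omega
  have h0 : (0 : Int) = PySem.Str.len (PySem.Str.join "" (toks.drop toks.length)) :=
    (drop_length_len_zero toks).symm
  rw [h0]
  by_cases h : ∃ jm, jm < toks.length ∧ PySem.Str.join "" (toks.drop jm) = p
  · obtain ⟨jm, hjm, hm⟩ := h
    rw [loopA_found p toks htoks hpos 0 jm (Nat.zero_le _) hjm hm,
      loopB_found p toks hpos toks.length jm hjm le_rfl hm]
  · push Not at h
    rw [loopA_none p toks htoks 0 (fun j _ hj => h j hj),
      loopB_none p toks toks.length le_rfl (fun j hj => h j hj)]
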